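-- pv_equiv track=rewrite | github.com/JAgbanwa/miscellaneousmathproblems | diophantine-y2-x3y-z4/modular_analysis.py | solutions_mod
-- ===== SOURCE A (Python) =====
-- def solutions_mod(m):
--     """Return list of (x,y,z) mod m satisfying the equation."""
--     sols = []
--     for x in range(m):
--         x3 = pow(x, 3, m)
--         for y in range(m):
--             base = (y * y - x3 * y) % m
--             for z in range(m):
--                 z4 = pow(z, 4, m)
--                 if (base + z4 + 1) % m == 0:
--                     sols.append((x, y, z))
--     return sols
-- ===== SOURCE B (Python) =====
-- def solutions_mod(m):
--     """Return list of (x,y,z) mod m satisfying the equation."""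
--     zs_by_res = {}
--     for z in range(m):
--         zs_by_res.setdefault(pow(z, 4, m), []).append(z)
--     sols = []
--     for x in range(m):
--         x3 = pow(x, 3, m)
--         for y in range(m):
--             base = (y * y - x3 * y) % m
--             target = (-(base + 1)) % m
--             for z in zs_by_res.get(target, []):
--                 sols.append((x, y, z))
--     return sols
-- ===== Notes on version B (the rewrite author's own statement) =====
-- stated objective: faster
-- what changed: Precompute a dict mapping each z^4 residue to its (ascending) list of z values in one pass, then for each (x,y) look up the single target residue -(base+1) mod m instead of scanning all z.
import Mathlib
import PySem

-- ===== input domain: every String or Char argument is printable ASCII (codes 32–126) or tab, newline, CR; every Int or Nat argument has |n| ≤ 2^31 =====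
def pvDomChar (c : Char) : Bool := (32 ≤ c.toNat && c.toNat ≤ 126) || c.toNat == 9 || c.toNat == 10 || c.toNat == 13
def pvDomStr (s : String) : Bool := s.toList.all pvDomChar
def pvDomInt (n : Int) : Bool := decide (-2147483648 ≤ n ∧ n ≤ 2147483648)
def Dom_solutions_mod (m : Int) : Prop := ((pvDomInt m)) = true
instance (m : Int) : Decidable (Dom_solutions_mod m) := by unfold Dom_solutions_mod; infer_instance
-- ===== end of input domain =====

-- B replaces the innermost z-scan by a one-pass dict from z^4 residues to their z lists,
-- looked up at the target residue per (x,y): asymptotically faster, same output.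

-- ===== PORT A =====
def solutions_mod (m : Int) : List (Int × Int × Int) :=
  (PySem.List.pyRange 0 m 1).foldl (fun sols x =>
    let x3 := PySem.Int.powMod x 3 m
    (PySem.List.pyRange 0 m 1).foldl (fun sols y =>
      let base := PySem.Int.mod (y * y - x3 * y) m
      (PySem.List.pyRange 0 m 1).foldl (fun sols z =>
        let z4 := PySem.Int.powMod z 4 m
        if PySem.Int.mod (base + z4 + 1) m = 0 then sols ++ [(x, y, z)] else sols) sols) sols) []

-- ===== PORT B =====
-- the setdefault(...).append grouping loop of Source B
def solutionsModZTable (m : Int) : PySem.Dict Int (List Int) :=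
  (PySem.List.pyRange 0 m 1).foldl
    (fun d z => d.modify (PySem.Int.powMod z 4 m) [] (· ++ [z])) PySem.Dict.empty

def solutions_mod_alt (m : Int) : List (Int × Int × Int) :=
  let zsByRes := solutionsModZTable m
  (PySem.List.pyRange 0 m 1).foldl (fun sols x =>
    let x3 := PySem.Int.powMod x 3 m
    (PySem.List.pyRange 0 m 1).foldl (fun sols y =>
      let base := PySem.Int.mod (y * y - x3 * y) m
      let target := PySem.Int.mod (-(base + 1)) m
      (zsByRes.getD target []).foldl (fun sols z => sols ++ [(x, y, z)]) sols) sols) []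

-- ===== PRECONDITION & SPEC =====
def Spec_solutions_mod (m : Int) (out : List (Int × Int × Int)) : Prop := out = solutions_mod_alt m
instance (m : Int) (out : List (Int × Int × Int)) : Decidable (Spec_solutions_mod m out) := by unfold Spec_solutions_mod; infer_instance

-- ===== CLAIM (what is proved, stated in full; the proofs are below) =====
def Claim_equal_solutions_mod : Prop := ∀ (m : Int), Dom_solutions_mod m → Spec_solutions_mod m (solutions_mod m)

-- ===== LEMMAS AND PROOFS =====

-- the table maps c to exactly the z in range(m) with z^4 % m = c, in ascending order
theorem solutionsModZTable_getD (m c : Int) :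
    (solutionsModZTable m).getD c [] =
      (PySem.List.pyRange 0 m 1).filter (fun z => PySem.Int.powMod z 4 m == c) := by
  unfold solutionsModZTable
  have hmap : (PySem.List.pyRange 0 m 1).foldl
      (fun d z => d.modify (PySem.Int.powMod z 4 m) [] (· ++ [z])) PySem.Dict.empty
      = ((PySem.List.pyRange 0 m 1).map (fun z => (PySem.Int.powMod z 4 m, z))).foldl
          (fun (d : PySem.Dict Int (List Int)) (p : Int × Int) => d.modify p.1 [] (· ++ [p.2]))
          PySem.Dict.empty := by
    rw [List.foldl_map]
  rw [hmap, PySem.Dict.getD_foldl_modify_append, PySem.Dict.getD_empty,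
    List.filter_map, List.map_map]
  simp [Function.comp_def]

-- the membership test of A equals the target-residue equation of B (any base, 0 < m)
theorem cond_iff_target (m base z : Int) (hm : 0 < m) :
    (PySem.Int.mod (base + PySem.Int.powMod z 4 m + 1) m = 0) ↔
      (PySem.Int.powMod z 4 m = PySem.Int.mod (-(base + 1)) m) := by
  simp only [PySem.Int.powMod, PySem.Int.mod_eq_emod_of_pos hm]
  rw [show base + z ^ 4 % m + 1 = z ^ 4 % m - -(base + 1) from by ring,
    ← Int.emod_eq_emod_iff_emod_sub_eq_zero, Int.emod_emod_of_dvd _ dvd_rfl]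

theorem filter_cond_eq (m base : Int) (hm : 0 < m) :
    (PySem.List.pyRange 0 m 1).filter
      (fun z => decide (PySem.Int.mod (base + PySem.Int.powMod z 4 m + 1) m = 0))
    = (PySem.List.pyRange 0 m 1).filter
      (fun z => PySem.Int.powMod z 4 m == PySem.Int.mod (-(base + 1)) m) := by
  apply List.filter_congr
  intro z _
  simp [cond_iff_target m base z hm]
  rfl

theorem solutions_mod_eq_pos (m : Int) (hm : 0 < m) : solutions_mod m = solutions_mod_alt m := by
  unfold solutions_mod solutions_mod_alt
  have hfil := fun base => filter_cond_eq m base hm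
  simp only [PySem.List.foldl_append_ite, PySem.List.foldl_append_singleton_eq_map,
    solutionsModZTable_getD, hfil]

-- ===== VERDICT (by name: the statement is the Claim_ definition above) =====
theorem solutions_mod_spec : Claim_equal_solutions_mod := by
  intro m _
  unfold Spec_solutions_mod
  rcases lt_or_ge 0 m with hm | hm
  · exact solutions_mod_eq_pos m hm
  · unfold solutions_mod solutions_mod_alt
    rw [PySem.List.pyRange_one_eq_nil (by omega)]
    rfl
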